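-- pv_equiv track=rewrite | github.com/foxxpy/Codingame-Puzzle-Moyen | 028. Calcul Maya/calcul_maya.py | decimal_to_maya
-- ===== SOURCE A (Python) =====
-- def decimal_to_maya(maya, num):
--     """Convertit un nombre décimal en nombre maya"""
--     if num == 0:
--         return [maya[0]]
--
--     else:
--         maya_num = []
--         i = 1
--         #On cherche entre quelles puissances de 20 est compris le nombre décimal
--         while(not 20**(i-1) <= num < 20**(i)):
--             i = i + 1
--
--         for j in range(i-1, -1, -1):
--             digit = num // (20**j)
--             num = num % (20**j)
--             maya_num.append(maya[digit])
--
--         return maya_num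
-- ===== SOURCE B (Python) =====
-- def decimal_to_maya(maya, num):
--     """Convertit un nombre décimal en nombre maya"""
--     if num == 0:
--         return [maya[0]]
--     digits = []
--     while num > 0:
--         digits.append(maya[num % 20])
--         num //= 20
--     return digits[::-1]
-- ===== Notes on version B (the rewrite author's own statement) =====
-- stated objective: simpler
-- what changed: Drops A's power-of-20 digit-counting while-loop and the MSB-first floordiv/mod pass; B extracts digits least-significant-first with a single num%20 / num//=20 loop and reverses at the end.
import Mathlib
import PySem

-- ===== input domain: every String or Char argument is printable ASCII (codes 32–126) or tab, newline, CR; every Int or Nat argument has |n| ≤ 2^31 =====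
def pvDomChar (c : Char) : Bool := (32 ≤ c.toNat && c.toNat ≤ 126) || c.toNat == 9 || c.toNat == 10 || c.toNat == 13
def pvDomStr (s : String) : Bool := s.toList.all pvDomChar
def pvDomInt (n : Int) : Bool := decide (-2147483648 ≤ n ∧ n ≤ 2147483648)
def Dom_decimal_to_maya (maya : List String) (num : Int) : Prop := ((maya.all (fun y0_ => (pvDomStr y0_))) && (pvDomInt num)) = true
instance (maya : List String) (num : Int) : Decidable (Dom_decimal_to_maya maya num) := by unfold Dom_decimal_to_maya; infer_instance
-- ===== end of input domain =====

-- Header: B replaces A's power-of-20 counting pre-pass and MSB-first division pass by one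
-- LSB-first `num % 20` / `num //= 20` loop followed by a reverse (objective: simpler).

-- ===== PORT A =====
-- the `while not 20**(i-1) <= num < 20**i: i += 1` search; fuel only makes it total
-- (the Python loop diverges for num < 0, which Pre_ excludes)
def pvFindI (num : Int) (i : Nat) (fuel : Nat) : Nat :=
  match fuel with
  | 0 => i
  | fuel + 1 =>
    if ¬ ((20 : Int) ^ (i - 1) ≤ num ∧ num < (20 : Int) ^ i) then pvFindI num (i + 1) fuel
    else i

-- the `for j in range(i-1, -1, -1)` loop: i remaining iterations, exponent j = i-1 first
def pvALoop (maya : List String) (num : Int) (i : Nat) : List String :=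
  match i with
  | 0 => []
  | j + 1 =>
    PySem.List.pyGetD maya (PySem.Int.floordiv num ((20 : Int) ^ j)) ""
      :: pvALoop maya (PySem.Int.mod num ((20 : Int) ^ j)) j

def decimal_to_maya (maya : List String) (num : Int) : List String :=
  if num = 0 then [PySem.List.pyGetD maya 0 ""]
  else pvALoop maya num (pvFindI num 1 (num.toNat + 1))

-- ===== PORT B =====
-- the `while num > 0` loop; fuel only makes it total (num.toNat + 1 always suffices)
def pvBLoop (maya : List String) (num : Int) (digits : List String) (fuel : Nat) : List String :=
  match fuel with
  | 0 => digits
  | fuel + 1 =>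
    if 0 < num then
      pvBLoop maya (PySem.Int.floordiv num 20)
        (digits ++ [PySem.List.pyGetD maya (PySem.Int.mod num 20) ""]) fuel
    else digits

def decimal_to_maya_alt (maya : List String) (num : Int) : List String :=
  if num = 0 then [PySem.List.pyGetD maya 0 ""]
  else (pvBLoop maya num [] (num.toNat + 1)).reverse

-- ===== PRECONDITION & SPEC =====
-- Pre_ excludes exactly where the Python A does not return: num < 0 (the while loop never
-- terminates) and inputs whose base-20 digit list reaches past maya (IndexError); num = 0
-- needs maya nonempty for maya[0].
def Pre_decimal_to_maya (maya : List String) (num : Int) : Prop :=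
  0 ≤ num ∧ maya ≠ [] ∧ ∀ d ∈ Nat.digits 20 num.toNat, d < maya.length
instance (maya : List String) (num : Int) : Decidable (Pre_decimal_to_maya maya num) := by
  unfold Pre_decimal_to_maya; infer_instance

def pvWitness_decimal_to_maya : List String × Int :=
  (["z", "o", "t", "h", "f", "v", "s", "e", "g", "n", "A", "B", "C", "D", "E", "F", "G", "H", "I", "J"], 423)

def Spec_decimal_to_maya (maya : List String) (num : Int) (out : List String) : Prop := out = decimal_to_maya_alt maya num
instance (maya : List String) (num : Int) (out : List String) : Decidable (Spec_decimal_to_maya maya num out) := by unfold Spec_decimal_to_maya; infer_instance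

-- ===== CLAIM (what is proved, stated in full; the proofs are below) =====
def Claim_equal_decimal_to_maya : Prop := ∀ (maya : List String) (num : Int), Dom_decimal_to_maya maya num → Pre_decimal_to_maya maya num → Spec_decimal_to_maya maya num (decimal_to_maya maya num)

-- ===== LEMMAS AND PROOFS =====

-- the shared digit-to-glyph map
def pvDigitStr (maya : List String) (d : Nat) : String := PySem.List.pyGetD maya (d : Int) ""

-- canonical MSB-first base-20 digit expansion of length i (what A's for-loop walks)
def pvMsb (i n : Nat) : List Nat :=
  match i with
  | 0 => []
  | j + 1 => n / 20 ^ j :: pvMsb j (n % 20 ^ j)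

-- canonical LSB-first base-20 digit expansion of length i
def pvLsbPad (i n : Nat) : List Nat :=
  match i with
  | 0 => []
  | j + 1 => n % 20 :: pvLsbPad j (n / 20)

-- LSB-first digits without padding (what B's while-loop walks)
def pvLsb (n : Nat) : List Nat :=
  if h : n = 0 then [] else n % 20 :: pvLsb (n / 20)
decreasing_by exact Nat.div_lt_self (Nat.pos_of_ne_zero h) (by omega)

lemma pvMsb_reverse (i n : Nat) (h : n < 20 ^ i) :
    (pvMsb i n).reverse = pvLsbPad i n := by
  induction i generalizing n with
  | zero => simp [pvMsb, pvLsbPad]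
  | succ j ih =>
    -- first a pure identity: pvLsbPad (j+1) n = pvLsbPad j (n % 20^j) ++ [n / 20^j]
    have key : ∀ (j n : Nat), n < 20 ^ (j + 1) →
        pvLsbPad (j + 1) n = pvLsbPad j (n % 20 ^ j) ++ [n / 20 ^ j] := by
      intro j
      induction j with
      | zero =>
        intro n hn
        simp [pvLsbPad]
        omega
      | succ k ihk =>
        intro n hn
        have h1 : n / 20 < 20 ^ (k + 1) := by
          rw [Nat.div_lt_iff_lt_mul (by omega)]
          calc n < 20 ^ (k + 2) := hn
            _ = 20 ^ (k + 1) * 20 := by ring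
        have e1 : n % 20 ^ (k + 1) % 20 = n % 20 := by
          have : (20 : Nat) ∣ 20 ^ (k + 1) := dvd_pow_self 20 (by omega)
          exact Nat.mod_mod_of_dvd n this
        have e2 : n % 20 ^ (k + 1) / 20 = n / 20 % 20 ^ k := by
          have e : (20 : Nat) ^ (k + 1) = 20 * 20 ^ k := by ring
          rw [e, Nat.mod_mul_right_div_self]
        have e3 : n / 20 / 20 ^ k = n / 20 ^ (k + 1) := by
          rw [Nat.div_div_eq_div_mul]; congr 1; ring
        calc pvLsbPad (k + 2) n = n % 20 :: pvLsbPad (k + 1) (n / 20) := rfl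
          _ = n % 20 :: (pvLsbPad k (n / 20 % 20 ^ k) ++ [n / 20 / 20 ^ k]) := by
              rw [ihk (n / 20) h1]
          _ = (n % 20 :: pvLsbPad k (n / 20 % 20 ^ k)) ++ [n / 20 ^ (k + 1)] := by
              rw [e3]; rfl
          _ = pvLsbPad (k + 1) (n % 20 ^ (k + 1)) ++ [n / 20 ^ (k + 1)] := by
              show _ = (n % 20 ^ (k+1) % 20 :: pvLsbPad k (n % 20 ^ (k+1) / 20)) ++ _
              rw [e1, e2]
    have hr : n % 20 ^ j < 20 ^ j := Nat.mod_lt _ (pow_pos (by omega) j)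
    calc (pvMsb (j + 1) n).reverse
        = (pvMsb j (n % 20 ^ j)).reverse ++ [n / 20 ^ j] := by simp [pvMsb]
      _ = pvLsbPad j (n % 20 ^ j) ++ [n / 20 ^ j] := by rw [ih _ hr]
      _ = pvLsbPad (j + 1) n := (key j n h).symm

lemma pvLsbPad_eq_pvLsb (i n : Nat) (hlo : 20 ^ (i - 1) ≤ n) (hhi : n < 20 ^ i) :
    pvLsbPad i n = pvLsb n := by
  induction i generalizing n with
  | zero => omega
  | succ j ih =>
    have hn : n ≠ 0 := by
      have : (1 : Nat) ≤ 20 ^ (j + 1 - 1) := Nat.one_le_pow _ _ (by omega)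
      omega
    rw [pvLsb, dif_neg hn]
    show n % 20 :: pvLsbPad j (n / 20) = n % 20 :: pvLsb (n / 20)
    match j with
    | 0 =>
      have : n / 20 = 0 := by omega
      simp [pvLsbPad, this, pvLsb]
    | k + 1 =>
      congr 1
      apply ih
      · have h1 : 20 ^ (k + 1 + 1 - 1) = 20 ^ (k + 1 - 1) * 20 := by
          have : k + 1 + 1 - 1 = (k + 1 - 1) + 1 := by omega
          rw [this, pow_succ]
        rw [h1] at hlo
        omega
      · have h2 : 20 ^ (k + 1 + 1) = 20 ^ (k + 1) * 20 := by rw [pow_succ]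
        rw [h2] at hhi
        omega

-- A's search loop: for n ≥ 1 it returns the digit count L = log 20 n + 1
lemma pvFindI_eq (n : Nat) (hn : 1 ≤ n) (i fuel : Nat) (hi : 1 ≤ i)
    (hlo : 20 ^ (i - 1) ≤ n) (hfuel : Nat.log 20 n + 2 - i ≤ fuel) :
    pvFindI (n : Int) i fuel = Nat.log 20 n + 1 := by
  induction fuel generalizing i with
  | zero =>
    exfalso
    have hle : i ≤ Nat.log 20 n + 1 := by
      by_contra h
      have h2 : Nat.log 20 n + 1 ≤ i - 1 := by omega
      have : 20 ^ (Nat.log 20 n + 1) ≤ 20 ^ (i - 1) :=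
        Nat.pow_le_pow_right (by omega) h2
      have := Nat.lt_pow_succ_log_self (b := 20) (by omega) n
      omega
    omega
  | succ fuel ih =>
    rw [pvFindI]
    by_cases hend : i = Nat.log 20 n + 1
    · have hlt : n < 20 ^ i := by
        rw [hend]; exact Nat.lt_pow_succ_log_self (by omega) n
      have hloI : (20 : Int) ^ (i - 1) ≤ (n : Int) := by exact_mod_cast hlo
      have hltI : (n : Int) < (20 : Int) ^ i := by exact_mod_cast hlt
      rw [if_neg (by push Not; exact ⟨hloI, hltI⟩)]
      exact hend
    · have hi2 : i ≤ Nat.log 20 n := by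
        by_contra h
        have h2 : Nat.log 20 n + 1 ≤ i - 1 := by omega
        have : 20 ^ (Nat.log 20 n + 1) ≤ 20 ^ (i - 1) :=
          Nat.pow_le_pow_right (by omega) h2
        have := Nat.lt_pow_succ_log_self (b := 20) (by omega) n
        omega
      have hge : 20 ^ i ≤ n := by
        calc 20 ^ i ≤ 20 ^ Nat.log 20 n := Nat.pow_le_pow_right (by omega) hi2
          _ ≤ n := Nat.pow_log_le_self 20 (by omega)
      have hgeI : (20 : Int) ^ i ≤ (n : Int) := by exact_mod_cast hge
      rw [if_pos (fun hc => absurd hc.2 (not_lt.mpr hgeI))]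
      have heq : i + 1 - 1 = i := by omega
      exact ih (i + 1) (by omega) (by rw [heq]; exact hge) (by omega)

-- A's division loop computes the mapped MSB digit list
lemma pvALoop_eq (maya : List String) (i n : Nat) :
    pvALoop maya (n : Int) i
      = (pvMsb i n).map (pvDigitStr maya) := by
  induction i generalizing n with
  | zero => simp [pvALoop, pvMsb]
  | succ j ih =>
    rw [pvALoop, pvMsb]
    have hd : PySem.Int.floordiv (n : Int) ((20 : Int) ^ j) = ((n / 20 ^ j : Nat) : Int) := by
      have : ((20 : Int) ^ j) = ((20 ^ j : Nat) : Int) := by push_cast; ring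
      rw [this, PySem.Int.floordiv_natCast]
    have hm : PySem.Int.mod (n : Int) ((20 : Int) ^ j) = ((n % 20 ^ j : Nat) : Int) := by
      have : ((20 : Int) ^ j) = ((20 ^ j : Nat) : Int) := by push_cast; ring
      rw [this, PySem.Int.mod_natCast]
    rw [hd, hm, ih]
    simp [pvDigitStr]

-- B's while loop computes the mapped LSB digit list (appended to the accumulator)
lemma pvBLoop_eq (maya : List String) (n : Nat) (acc : List String) (fuel : Nat)
    (hfuel : n ≤ fuel) :
    pvBLoop maya (n : Int) acc fuel
      = acc ++ (pvLsb n).map (pvDigitStr maya) := by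
  induction fuel generalizing n acc with
  | zero =>
    have : n = 0 := by omega
    subst this
    rw [pvBLoop, pvLsb]
    simp
  | succ fuel ih =>
    rw [pvBLoop]
    by_cases hn : n = 0
    · subst hn
      rw [if_neg (by omega)]
      rw [pvLsb]
      simp
    · rw [if_pos (by exact_mod_cast Nat.pos_of_ne_zero hn)]
      have hd : PySem.Int.floordiv (n : Int) 20 = ((n / 20 : Nat) : Int) := by
        exact_mod_cast PySem.Int.floordiv_natCast n 20
      have hm : PySem.Int.mod (n : Int) 20 = ((n % 20 : Nat) : Int) := by
        exact_mod_cast PySem.Int.mod_natCast n 20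
      have hdiv : n / 20 ≤ fuel := by
        have := Nat.div_lt_self (Nat.pos_of_ne_zero hn) (show 1 < 20 by omega)
        omega
      rw [hd, hm, ih _ _ hdiv]
      conv_rhs => rw [pvLsb]
      rw [dif_neg hn]
      simp [pvDigitStr]

-- ===== VERDICT (by name: the statement is the Claim_ definition above) =====
theorem decimal_to_maya_spec : Claim_equal_decimal_to_maya := by
  intro maya num _ hpre
  obtain ⟨hnum, -, -⟩ := hpre
  unfold Spec_decimal_to_maya decimal_to_maya decimal_to_maya_alt
  by_cases h0 : num = 0
  · simp [h0]
  · rw [if_neg h0, if_neg h0]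
    obtain ⟨n, rfl⟩ : ∃ n : Nat, num = (n : Int) := ⟨num.toNat, by omega⟩
    have hn : 1 ≤ n := by
      by_contra h
      exact h0 (by omega)
    have htoNat : ((n : Int)).toNat = n := by omega
    set L := Nat.log 20 n + 1 with hL
    have hfind : pvFindI (n : Int) 1 (((n : Int)).toNat + 1) = L := by
      apply pvFindI_eq n hn 1 _ (by omega) (by simpa using hn)
      have := Nat.log_le_self 20 n
      omega
    have hlo : 20 ^ (L - 1) ≤ n := by
      simpa [hL] using Nat.pow_log_le_self 20 (by omega : n ≠ 0)
    have hhi : n < 20 ^ L := Nat.lt_pow_succ_log_self (by omega) n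
    rw [hfind, pvALoop_eq, pvBLoop_eq maya n [] _ (by omega)]
    have hkey : pvMsb L n = (pvLsb n).reverse := by
      rw [← pvLsbPad_eq_pvLsb L n hlo hhi, ← pvMsb_reverse L n hhi, List.reverse_reverse]
    rw [List.nil_append, hkey, List.map_reverse]
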